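-- pv_equiv track=rewrite | github.com/iminurnamez/cryptogrammer | data/states/menu.py | judge_difficulty
-- ===== SOURCE A (Python) =====
-- from string import punctuation
--
-- def judge_difficulty(text):
--     words = [w.strip(punctuation) for w in text.split(" ")]
--     num_words = len(words)
--     doubles = 0
--     one_letter = len([x for x in words if len(x) == 1])
--     two_letters = len([x for x in words if len(x) == 2])
--     three_letters = len([x for x in words if len(x) == 3])
--     four_letters = len([x for x in words if len(x) == 4])
--     for w in words:
--         for i, c in enumerate(w):
--             try:
--                 next_letter = w[i + 1]
--                 if next_letter == c:
--                     doubles += 1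
--             except IndexError:
--                 pass
--     score = sum((one_letter * 5, two_letters * 4, three_letters * 3,
--                         four_letters * 1, doubles * 2, num_words))
--     return score
-- ===== SOURCE B (Python) =====
-- from string import punctuation
--
-- def judge_difficulty(text):
--     score = 0
--     for raw in text.split(" "):
--         w = raw.strip(punctuation)
--         L = len(w)
--         score += 1
--         if L == 1:
--             score += 5
--         elif L == 2:
--             score += 4
--         elif L == 3:
--             score += 3
--         elif L == 4:
--             score += 1
--         score += 2 * sum(a == b for a, b in zip(w, w[1:]))
--     return score
-- ===== Notes on version B (the rewrite author's own statement) =====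
-- stated objective: simpler
-- what changed: The four length-bucket comprehensions, the try/except indexed doubles loop and the final sum are replaced by one fused pass over the words that accumulates per-word +1, a length bonus and 2x the adjacent-equal-pair count via zip(w, w[1:]).
import Mathlib
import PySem

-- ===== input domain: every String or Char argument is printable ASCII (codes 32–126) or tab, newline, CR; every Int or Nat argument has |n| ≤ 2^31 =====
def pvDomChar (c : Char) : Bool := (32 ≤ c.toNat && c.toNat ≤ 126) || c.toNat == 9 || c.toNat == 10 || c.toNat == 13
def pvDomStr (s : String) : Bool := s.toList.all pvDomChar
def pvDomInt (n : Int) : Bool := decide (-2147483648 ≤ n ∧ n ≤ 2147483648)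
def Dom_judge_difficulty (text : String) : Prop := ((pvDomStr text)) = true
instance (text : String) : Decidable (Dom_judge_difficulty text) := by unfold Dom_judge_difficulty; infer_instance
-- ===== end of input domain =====

-- B fuses A's four length-bucket comprehensions and its try/except doubles loop into one pass over the words (objective: simpler).

-- string.punctuation
def pvPunct : List Char := "!\"#$%&'()*+,-./:;<=>?@[\\]^_`{|}~".toList

-- ===== PORT A =====
def judge_difficulty (text : String) : Int :=
  let words := (PySem.Chars.splitOn text.toList [' ']).map (fun w => PySem.Chars.stripChars w pvPunct)
  let num_words : Int := words.length
  let doubles : Int := words.foldl (fun d w =>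
    (PySem.List.enumerate w).foldl (fun d ic =>
      match PySem.List.pyGet? w (ic.1 + 1) with   -- try: w[i+1] … except IndexError: pass
      | some next_letter => if next_letter == ic.2 then d + 1 else d
      | none => d) d) 0
  let one_letter : Int := ((words.filter (fun x => x.length == 1)).length : Int)
  let two_letters : Int := ((words.filter (fun x => x.length == 2)).length : Int)
  let three_letters : Int := ((words.filter (fun x => x.length == 3)).length : Int)
  let four_letters : Int := ((words.filter (fun x => x.length == 4)).length : Int)
  [one_letter * 5, two_letters * 4, three_letters * 3, four_letters * 1, doubles * 2, num_words].sum

-- ===== PORT B =====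
def judge_difficulty_alt (text : String) : Int :=
  (PySem.Chars.splitOn text.toList [' ']).foldl (fun score raw =>
    let w := PySem.Chars.stripChars raw pvPunct
    let L := w.length
    score + 1
      + (if L == 1 then 5 else if L == 2 then 4 else if L == 3 then 3 else if L == 4 then 1 else 0)
      + 2 * (((w.zip w.tail).countP (fun p => p.1 == p.2) : Nat) : Int)) 0

-- ===== PRECONDITION & SPEC =====
def Spec_judge_difficulty (text : String) (out : Int) : Prop := out = judge_difficulty_alt text
instance (text : String) (out : Int) : Decidable (Spec_judge_difficulty text out) := by unfold Spec_judge_difficulty; infer_instance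

-- ===== CLAIM (what is proved, stated in full; the proofs are below) =====
def Claim_equal_judge_difficulty : Prop := ∀ (text : String), Dom_judge_difficulty text → Spec_judge_difficulty text (judge_difficulty text)

-- ===== LEMMAS AND PROOFS =====

-- adjacent-equal-pair count of a word (B's zip expression), as an Int
def pvCZ (w : List Char) : Int := (((w.zip w.tail).countP (fun p => p.1 == p.2) : Nat) : Int)

-- B's per-word bonus
def pvBonus (L : Nat) : Int := if L == 1 then 5 else if L == 2 then 4 else if L == 3 then 3 else if L == 4 then 1 else 0

-- A's inner indexed loop over a suffix of w counts exactly the adjacent equal pairs of that suffix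
theorem pv_inner (w : List Char) : ∀ (t : List Char) (k : Nat), w.drop k = t → ∀ (d : Int),
    (PySem.List.enumerate t (k : Int)).foldl (fun d ic =>
      match PySem.List.pyGet? w (ic.1 + 1) with
      | some next_letter => if next_letter == ic.2 then d + 1 else d
      | none => d) d = d + pvCZ t := by
  intro t
  induction t with
  | nil => intro k hk d; simp [PySem.List.enumerate_nil, pvCZ]
  | cons a t' ih =>
    intro k hk d
    have hdrop : w.drop (k + 1) = t' := by
      have h1 : (w.drop k).drop 1 = w.drop (k + 1) := by
        rw [List.drop_drop]
      rw [← h1, hk]; rfl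
    have hget : PySem.List.pyGet? w ((k : Int) + 1) = t'.head? := by
      have hcast : ((k : Int) + 1) = ((k + 1 : Nat) : Int) := by push_cast; ring
      rw [hcast, PySem.List.pyGet?_natCast]
      have : w[k + 1]? = (w.drop (k + 1))[0]? := by
        rw [List.getElem?_drop]
      rw [this, hdrop, ← List.head?_eq_getElem?]
    rw [PySem.List.enumerate_cons, List.foldl_cons]
    cases t' with
    | nil =>
      simp only [hget, List.head?_nil]
      simp [PySem.List.enumerate_nil, pvCZ]
    | cons b t'' =>
      rw [hget]
      simp only [List.head?_cons]
      have hk1 : ((k : Int) + 1) = ((k + 1 : Nat) : Int) := by push_cast; ring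
      rw [hk1, ih (k + 1) hdrop]
      have hcz : pvCZ (a :: b :: t'') = (if a == b then 1 else 0) + pvCZ (b :: t'') := by
        simp only [pvCZ, List.zip_cons_cons, List.tail_cons, List.countP_cons]
        by_cases hab : a = b
        · subst hab; simp only [beq_self_eq_true, if_true]
          push_cast; ring
        · have h1 : ((a, b).1 == (a, b).2) = false := by simpa using hab
          rw [h1]
          simp
      rw [hcz]
      by_cases hab : a = b
      · subst hab
        simp only [beq_self_eq_true, if_true]
        ring
      · have h1 : (b == a) = false := by simpa using (Ne.symm hab)
        have h2 : (a == b) = false := by simpa using hab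
        simp only [h1, h2, Bool.false_eq_true, if_false]
        ring

-- A's doubles fold = sum of per-word pair counts
theorem pv_doubles (ws : List (List Char)) : ∀ (d : Int),
    ws.foldl (fun d w =>
      (PySem.List.enumerate w).foldl (fun d ic =>
        match PySem.List.pyGet? w (ic.1 + 1) with
        | some next_letter => if next_letter == ic.2 then d + 1 else d
        | none => d) d) d = d + (ws.map pvCZ).sum := by
  induction ws with
  | nil => intro d; simp
  | cons w ws ih =>
    intro d
    rw [List.foldl_cons]
    have h0 : (PySem.List.enumerate w (((0 : Nat) : Int))).foldl (fun d ic =>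
      match PySem.List.pyGet? w (ic.1 + 1) with
      | some next_letter => if next_letter == ic.2 then d + 1 else d
      | none => d) d = d + pvCZ w := pv_inner w w 0 List.drop_zero d
    simp only [Nat.cast_zero] at h0
    rw [h0, ih]
    simp [add_assoc]

-- the sum of B's per-word contributions equals A's bucketed expression
theorem pv_sum_w (ws : List (List Char)) :
    (ws.map (fun w => 1 + pvBonus w.length + 2 * pvCZ w)).sum =
      ((ws.filter (fun x => x.length == 1)).length : Int) * 5 +
      ((ws.filter (fun x => x.length == 2)).length : Int) * 4 +
      ((ws.filter (fun x => x.length == 3)).length : Int) * 3 +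
      ((ws.filter (fun x => x.length == 4)).length : Int) * 1 +
      (ws.map pvCZ).sum * 2 + (ws.length : Int) := by
  induction ws with
  | nil => simp
  | cons w ws ih =>
    rw [List.map_cons, List.sum_cons, ih, List.map_cons, List.sum_cons]
    simp only [List.filter_cons, List.length_cons, pvBonus, beq_iff_eq]
    split_ifs <;> (try simp only [List.length_cons]) <;> push_cast <;> omega

theorem pv_sum (ps : List (List Char)) :
    (ps.map (fun raw => 1 + pvBonus (PySem.Chars.stripChars raw pvPunct).length
        + 2 * pvCZ (PySem.Chars.stripChars raw pvPunct))).sum =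
      (((ps.map (fun w => PySem.Chars.stripChars w pvPunct)).filter (fun x => x.length == 1)).length : Int) * 5 +
      (((ps.map (fun w => PySem.Chars.stripChars w pvPunct)).filter (fun x => x.length == 2)).length : Int) * 4 +
      (((ps.map (fun w => PySem.Chars.stripChars w pvPunct)).filter (fun x => x.length == 3)).length : Int) * 3 +
      (((ps.map (fun w => PySem.Chars.stripChars w pvPunct)).filter (fun x => x.length == 4)).length : Int) * 1 +
      ((ps.map (fun w => PySem.Chars.stripChars w pvPunct)).map pvCZ).sum * 2 +
      ((ps.map (fun w => PySem.Chars.stripChars w pvPunct)).length : Int) := by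
  have h := pv_sum_w (ps.map (fun w => PySem.Chars.stripChars w pvPunct))
  rw [List.map_map] at h
  simpa [Function.comp_def] using h

-- ===== VERDICT (by name: the statement is the Claim_ definition above) =====
theorem judge_difficulty_spec : Claim_equal_judge_difficulty := by
  intro text _
  unfold Spec_judge_difficulty judge_difficulty judge_difficulty_alt
  dsimp only
  have hstep : (fun (score : Int) (raw : List Char) =>
      let w := PySem.Chars.stripChars raw pvPunct
      let L := w.length
      score + 1
        + (if L == 1 then 5 else if L == 2 then 4 else if L == 3 then 3 else if L == 4 then 1 else 0)
        + 2 * (((w.zip w.tail).countP (fun p => p.1 == p.2) : Nat) : Int)) =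
      (fun (score : Int) (raw : List Char) =>
        score + (1 + pvBonus (PySem.Chars.stripChars raw pvPunct).length
          + 2 * pvCZ (PySem.Chars.stripChars raw pvPunct))) := by
    funext s r
    simp only [pvBonus, pvCZ]
    ring
  rw [hstep, PySem.List.foldl_add, pv_sum, pv_doubles _ 0]
  simp only [List.sum_cons, List.sum_nil]
  omega
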